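-- pv_equiv track=rewrite | github.com/wschuell/repodepo | repodepo/fillers/generic.py | get_urlroot
-- ===== SOURCE A (Python) =====
-- def get_urlroot(url):
--     prefixes = [
--         "https://",
--         "http://",
--         "https:/",
--         "http:/",
--         "/",
--         "/",
--         "www.",
--         "ssh:",
--         "git@",
--     ]
--     cleaned_url = url
--     while any(cleaned_url.startswith(p) for p in prefixes):
--         for p in prefixes:
--             if cleaned_url.startswith(p):
--                 cleaned_url = cleaned_url[len(p) :]
--     source = cleaned_url.split("/")[0].lower()
--     if url.startswith("https:"):
--         return source, "https://" + cleaned_url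
--     else:
--         return source, "http://" + cleaned_url
-- ===== SOURCE B (Python) =====
-- def get_urlroot(url):
--     # strip one leading prefix at a time, first match wins, until none matches;
--     # "https://" and "http://" are covered by "https:/"/"http:/" followed by "/"
--     cleaned_url = url
--     while True:
--         for p in ("https:/", "http:/", "/", "www.", "ssh:", "git@"):
--             if cleaned_url.startswith(p):
--                 cleaned_url = cleaned_url[len(p):]
--                 break
--         else:
--             break
--     source = cleaned_url.split("/")[0].lower()
--     scheme = "https://" if url.startswith("https:") else "http://"
--     return source, scheme + cleaned_url
-- ===== Notes on version B (the rewrite author's own statement) =====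
-- stated objective: simpler
-- what changed: A's while-any fixpoint that sweeps a 9-entry prefix list (with duplicates and compound https:///http:// entries) repeatedly is replaced by a single recursive first-match stripper over the 6 irredundant prefixes.
import Mathlib
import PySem

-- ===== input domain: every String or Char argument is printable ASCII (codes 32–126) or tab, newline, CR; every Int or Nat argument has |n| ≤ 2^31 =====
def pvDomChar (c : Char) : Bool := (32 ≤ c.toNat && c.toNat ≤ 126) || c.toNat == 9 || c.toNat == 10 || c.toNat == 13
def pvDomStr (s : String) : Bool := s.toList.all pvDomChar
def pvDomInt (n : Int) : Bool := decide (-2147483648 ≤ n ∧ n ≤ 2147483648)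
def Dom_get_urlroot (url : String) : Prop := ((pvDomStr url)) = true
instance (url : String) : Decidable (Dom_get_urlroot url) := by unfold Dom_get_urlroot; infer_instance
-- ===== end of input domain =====

-- B replaces A's while/for fixpoint over 9 (partly redundant) prefixes by a first-match
-- recursive stripper over the 6 irredundant prefixes (simpler; same return values).

-- ===== PORT A =====
-- A's prefix list, as code-point lists (each Python string literal, character by character)
def pvPrefixesA : List (List Char) :=
  [['h','t','t','p','s',':','/','/'], ['h','t','t','p',':','/','/'],
   ['h','t','t','p','s',':','/'], ['h','t','t','p',':','/'],
   ['/'], ['/'], ['w','w','w','.'], ['s','s','h',':'], ['g','i','t','@']]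

-- the body of A's inner for loop: cleaned_url = cleaned_url[len(p):] when it startswith p
def pvStepFn (c p : List Char) : List Char :=
  if PySem.Chars.startswith c p then c.drop p.length else c

-- one full pass of A's inner for loop over the prefix list
def pvPass (s : List Char) : List Char := pvPrefixesA.foldl pvStepFn s

-- A's while-loop guard: any(cleaned_url.startswith(p) for p in prefixes)
def pvAnyPrefix (s : List Char) : Bool :=
  pvPrefixesA.any (fun p => PySem.Chars.startswith s p)

-- termination of A's while loop: a pass never lengthens the string …
lemma pvFold_le (ps : List (List Char)) (s : List Char) :
    (ps.foldl pvStepFn s).length ≤ s.length := by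
  induction ps generalizing s with
  | nil => simp
  | cons p ps ih =>
    simp only [List.foldl_cons]
    refine le_trans (ih (pvStepFn s p)) ?_
    unfold pvStepFn; split <;> simp [List.length_drop]

-- … and strictly shortens it when the guard holds
lemma pvFold_lt (ps : List (List Char)) (s : List Char) :
    (∀ p ∈ ps, p ≠ []) → (ps.any (fun p => PySem.Chars.startswith s p) = true) →
    (ps.foldl pvStepFn s).length < s.length := by
  induction ps generalizing s with
  | nil => intro _ h; simp at h
  | cons p ps ih =>
    intro hne h
    simp only [List.foldl_cons]
    have hne' : ∀ q ∈ ps, q ≠ [] := fun q hq => hne q (List.mem_cons_of_mem _ hq)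
    by_cases hst : PySem.Chars.startswith s p = true
    · have hle := ((PySem.Chars.startswith_iff s p).mp hst).length_le
      have hpos : 0 < p.length :=
        List.length_pos_of_ne_nil (hne p (List.mem_cons_self))
      have : (pvStepFn s p).length < s.length := by
        unfold pvStepFn; rw [if_pos hst]; simp [List.length_drop]; omega
      exact lt_of_le_of_lt (pvFold_le ps (pvStepFn s p)) this
    · simp only [List.any_cons, hst, Bool.false_or] at h
      have : pvStepFn s p = s := by unfold pvStepFn; rw [if_neg hst]
      rw [this]; exact ih s hne' h

-- A's while loop, recursion on the (strictly decreasing) string length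
def pvLoopA (s : List Char) : List Char :=
  if h : pvAnyPrefix s = true then pvLoopA (pvPass s) else s
termination_by s.length
decreasing_by exact pvFold_lt pvPrefixesA s (by decide) h

def get_urlroot (url : String) : String × String :=
  let cleaned := pvLoopA url.toList
  -- cleaned_url.split("/")[0].lower(); split with a nonempty separator never returns [], so [0] is headD
  let source := PySem.Chars.lower ((PySem.Chars.splitOn cleaned ['/']).headD [])
  if PySem.Chars.startswith url.toList ['h','t','t','p','s',':'] then
    (String.ofList source, String.ofList (['h','t','t','p','s',':','/','/'] ++ cleaned))
  else
    (String.ofList source, String.ofList (['h','t','t','p',':','/','/'] ++ cleaned))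

-- ===== PORT B =====
-- B's reduced prefix tuple
def pvPrefixesB : List (List Char) :=
  [['h','t','t','p','s',':','/'], ['h','t','t','p',':','/'],
   ['/'], ['w','w','w','.'], ['s','s','h',':'], ['g','i','t','@']]

lemma pvDropLt (s p : List Char) (hp : p ≠ []) (hst : PySem.Chars.startswith s p = true) :
    (s.drop p.length).length < s.length := by
  have hle := ((PySem.Chars.startswith_iff s p).mp hst).length_le
  have hpos : 0 < p.length := List.length_pos_of_ne_nil hp
  simp [List.length_drop]; omega

-- B's while loop: the inner for-with-break picks the FIRST matching prefix (find?); recursion = the while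
def pvStripB (s : List Char) : List Char :=
  match h : pvPrefixesB.find? (fun p => PySem.Chars.startswith s p) with
  | some p => pvStripB (s.drop p.length)
  | none => s
termination_by s.length
decreasing_by
  exact pvDropLt s p
    (by
      have hm := List.mem_of_find?_eq_some h
      revert hm; simp [pvPrefixesB]; rintro (rfl|rfl|rfl|rfl|rfl|rfl) <;> simp)
    (by simpa using List.find?_some h)

def get_urlroot_alt (url : String) : String × String :=
  let cleaned := pvStripB url.toList
  let source := PySem.Chars.lower ((PySem.Chars.splitOn cleaned ['/']).headD [])
  let scheme := if PySem.Chars.startswith url.toList ['h','t','t','p','s',':']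
    then ['h','t','t','p','s',':','/','/'] else ['h','t','t','p',':','/','/']
  (String.ofList source, String.ofList (scheme ++ cleaned))

-- ===== PRECONDITION & SPEC =====
def Spec_get_urlroot (url : String) (out : String × String) : Prop := out = get_urlroot_alt url
instance (url : String) (out : String × String) : Decidable (Spec_get_urlroot url out) := by unfold Spec_get_urlroot; infer_instance

-- ===== CLAIM (what is proved, stated in full; the proofs are below) =====
def Claim_equal_get_urlroot : Prop := ∀ (url : String), Dom_get_urlroot url → Spec_get_urlroot url (get_urlroot url)

-- ===== LEMMAS AND PROOFS =====

-- unfold pvStripB one step when the first match is known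
lemma pvStripB_step (s p : List Char)
    (hp : pvPrefixesB.find? (fun q => PySem.Chars.startswith s q) = some p) :
    pvStripB s = pvStripB (s.drop p.length) := by
  rw [pvStripB.eq_def, hp]

-- stripping any of A's nine prefixes does not change B's fixpoint
lemma pvStep_preserves (p : List Char) (hp : p ∈ pvPrefixesA) (s : List Char)
    (h : PySem.Chars.startswith s p = true) :
    pvStripB (s.drop p.length) = pvStripB s := by
  obtain ⟨t, rfl⟩ := (PySem.Chars.startswith_iff s p).mp h
  rw [List.drop_left]
  simp only [pvPrefixesA, List.mem_cons, List.not_mem_nil, or_false] at hp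
  rcases hp with rfl|rfl|rfl|rfl|rfl|rfl|rfl|rfl|rfl
  · have e : ['h','t','t','p','s',':','/','/'] ++ t = ['h','t','t','p','s',':','/'] ++ ('/' :: t) := by simp
    rw [e, pvStripB_step (['h','t','t','p','s',':','/'] ++ ('/' :: t)) ['h','t','t','p','s',':','/']
          (by simp [pvPrefixesB, PySem.Chars.startswith, List.isPrefixOf]),
        List.drop_left,
        pvStripB_step ('/' :: t) ['/']
          (by simp [pvPrefixesB, PySem.Chars.startswith, List.isPrefixOf])]
    rfl
  · have e : ['h','t','t','p',':','/','/'] ++ t = ['h','t','t','p',':','/'] ++ ('/' :: t) := by simp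
    rw [e, pvStripB_step (['h','t','t','p',':','/'] ++ ('/' :: t)) ['h','t','t','p',':','/']
          (by simp [pvPrefixesB, List.find?, PySem.Chars.startswith, List.isPrefixOf]),
        List.drop_left,
        pvStripB_step ('/' :: t) ['/']
          (by simp [pvPrefixesB, PySem.Chars.startswith, List.isPrefixOf])]
    rfl
  · rw [pvStripB_step (['h','t','t','p','s',':','/'] ++ t) ['h','t','t','p','s',':','/']
          (by simp [pvPrefixesB, PySem.Chars.startswith, List.isPrefixOf]),
        List.drop_left]
  · rw [pvStripB_step (['h','t','t','p',':','/'] ++ t) ['h','t','t','p',':','/']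
          (by simp [pvPrefixesB, List.find?, PySem.Chars.startswith, List.isPrefixOf]),
        List.drop_left]
  · rw [pvStripB_step (['/'] ++ t) ['/']
          (by simp [pvPrefixesB, List.find?, PySem.Chars.startswith, List.isPrefixOf]),
        List.drop_left]
  · rw [pvStripB_step (['/'] ++ t) ['/']
          (by simp [pvPrefixesB, List.find?, PySem.Chars.startswith, List.isPrefixOf]),
        List.drop_left]
  · rw [pvStripB_step (['w','w','w','.'] ++ t) ['w','w','w','.']
          (by simp [pvPrefixesB, List.find?, PySem.Chars.startswith, List.isPrefixOf]),
        List.drop_left]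
  · rw [pvStripB_step (['s','s','h',':'] ++ t) ['s','s','h',':']
          (by simp [pvPrefixesB, List.find?, PySem.Chars.startswith, List.isPrefixOf]),
        List.drop_left]
  · rw [pvStripB_step (['g','i','t','@'] ++ t) ['g','i','t','@']
          (by simp [pvPrefixesB, List.find?, PySem.Chars.startswith, List.isPrefixOf]),
        List.drop_left]

-- hence a whole pass of A's inner for loop does not change B's fixpoint
lemma pvStripB_fold (ps : List (List Char)) (hsub : ∀ p ∈ ps, p ∈ pvPrefixesA)
    (s : List Char) : pvStripB (ps.foldl pvStepFn s) = pvStripB s := by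
  induction ps generalizing s with
  | nil => rfl
  | cons p ps ih =>
    simp only [List.foldl_cons]
    have hmem : p ∈ pvPrefixesA := hsub p List.mem_cons_self
    have hsub' : ∀ q ∈ ps, q ∈ pvPrefixesA := fun q hq => hsub q (List.mem_cons_of_mem _ hq)
    by_cases hst : PySem.Chars.startswith s p = true
    · have : pvStepFn s p = s.drop p.length := by unfold pvStepFn; rw [if_pos hst]
      rw [this, ih hsub', pvStep_preserves p hmem s hst]
    · have : pvStepFn s p = s := by unfold pvStepFn; rw [if_neg hst]
      rw [this, ih hsub']

-- when A's guard fails, no prefix of B's (sub)list matches either, so B is done too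
lemma pvStripB_done (s : List Char) (h : pvAnyPrefix s = false) : pvStripB s = s := by
  have hall : ∀ p ∈ pvPrefixesA, ¬ PySem.Chars.startswith s p = true := by
    simpa [pvAnyPrefix, List.any_eq_true] using h
  have hnone : pvPrefixesB.find? (fun p => PySem.Chars.startswith s p) = none := by
    rw [List.find?_eq_none]
    intro p hp
    apply hall
    revert hp; simp [pvPrefixesB, pvPrefixesA]; rintro (rfl|rfl|rfl|rfl|rfl|rfl) <;> simp
  rw [pvStripB.eq_def, hnone]

-- the two stripping loops agree everywhere
lemma pvMain (s : List Char) : pvLoopA s = pvStripB s := by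
  induction s using pvLoopA.induct with
  | case1 s h ih =>
    rw [pvLoopA, dif_pos h, ih]
    exact pvStripB_fold pvPrefixesA (fun p hp => hp) s
  | case2 s h =>
    rw [pvLoopA, dif_neg h, pvStripB_done s (by simpa using h)]

-- ===== VERDICT (by name: the statement is the Claim_ definition above) =====
theorem get_urlroot_spec : Claim_equal_get_urlroot := by
  intro url _
  unfold Spec_get_urlroot get_urlroot get_urlroot_alt
  rw [pvMain]
  by_cases h : PySem.Chars.startswith url.toList ['h','t','t','p','s',':'] = true <;>
    simp [h]
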